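-- pv_equiv track=rewrite | github.com/theknoxinator/AoC | Python/2018/day20.py | find_far_rooms
-- ===== SOURCE A (Python) =====
-- def find_far_rooms(values):
--     # I tried for a long while to come up with a way to use a tree or something to find paths, but eventually gave up
--     # and searched for help. Graph theory is a weak part of my knowledge so this is based on other solutions using that.
--     regex = values[0][1:-1]
--     target_distance = 10 if len(regex) < 100 else 1000
--
--     # This algorithm uses a stack of positions where the path branches, so that once we hit a pipe or right paren we can
--     # pop back to the previous position. I had this idea for my tree solution but this is just easier to do.
--     directions = {'N': (0, -1), 'E': (1, 0), 'S': (0, 1), 'W': (-1, 0)}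
--     positions = []
--     x, y = 0, 0
--     prev_x, prev_y = x, y
--     distances = dict()
--     distances[(x, y)] = 0
--     for val in regex:
--         if val == '(':
--             # Starting a branch, so add to positions
--             positions.append((x, y))
--         elif val == ')':
--             # Done branching in this subpath, go back to start of branch and remove from stack
--             x, y = positions.pop()
--         elif val == '|':
--             # Subpath is done but still more branches to check, go back to start but do not remove from stack yet
--             x, y = positions[-1]
--         else:
--             # Otherwise we are moving in a direction, get the offset and add it to the current x, y
--             dx, dy = directions[val]
--             x += dx
--             y += dy
--             if (x, y) in distances:
--                 distances[(x, y)] = min(distances[(x, y)], distances[(prev_x, prev_y)] + 1)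
--             else:
--                 distances[(x, y)] = distances[(prev_x, prev_y)] + 1
--
--         prev_x, prev_y = x, y
--
--     # Now tally up all the rooms in distances map that have a distance of 1000 or higher
--     return len([x for x in distances.values() if x >= target_distance])
-- ===== SOURCE B (Python) =====
-- def find_far_rooms(values):
--     # Recursive-descent walk of the regex: the call stack replaces A's explicit
--     # stack of branch positions, while keeping the same left-to-right min-update order.
--     regex = values[0][1:-1]
--     target_distance = 10 if len(regex) < 100 else 1000
--     directions = {'N': (0, -1), 'E': (1, 0), 'S': (0, 1), 'W': (-1, 0)}
--     distances = {(0, 0): 0}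
--
--     def walk(i, x, y, entry):
--         # Consume regex[i:] until the ')' closing the current group (or the end);
--         # 'entry' is the position the group was entered at, restored on each '|'.
--         while i < len(regex):
--             c = regex[i]
--             if c == '(':
--                 i = walk(i + 1, x, y, (x, y))
--             elif c == ')':
--                 return i + 1
--             elif c == '|':
--                 x, y = entry
--                 i += 1
--             else:
--                 dx, dy = directions[c]
--                 nx, ny = x + dx, y + dy
--                 nd = distances[(x, y)] + 1
--                 old = distances.get((nx, ny))
--                 distances[(nx, ny)] = nd if old is None else min(old, nd)
--                 x, y = nx, ny
--                 i += 1
--         return i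
--
--     walk(0, 0, 0, (0, 0))
--     return sum(1 for v in distances.values() if v >= target_distance)
-- ===== Notes on version B (the rewrite author's own statement) =====
-- stated objective: alternative
-- what changed: Replaces A's single linear scan with an explicit stack of branch positions by a recursive-descent walker over the regex in which the call stack holds the group-entry positions, preserving the same left-to-right min-update order.
import Mathlib
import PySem

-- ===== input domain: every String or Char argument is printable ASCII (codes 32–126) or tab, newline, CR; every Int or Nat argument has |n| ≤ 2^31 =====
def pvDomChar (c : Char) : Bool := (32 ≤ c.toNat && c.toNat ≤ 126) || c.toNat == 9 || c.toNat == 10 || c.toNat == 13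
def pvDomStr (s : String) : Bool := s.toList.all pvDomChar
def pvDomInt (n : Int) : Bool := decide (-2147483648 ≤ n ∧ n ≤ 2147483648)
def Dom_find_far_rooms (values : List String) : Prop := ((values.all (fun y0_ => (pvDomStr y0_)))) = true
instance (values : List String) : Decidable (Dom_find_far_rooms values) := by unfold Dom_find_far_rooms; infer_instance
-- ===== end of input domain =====

-- B replaces A's explicit stack of branch positions by a recursive-descent walker
-- (the call stack holds the group-entry positions); same dict updates in the same order.

-- ===== PORT A =====
-- directions = {'N': (0,-1), 'E': (1,0), 'S': (0,1), 'W': (-1,0)}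
def pvDirs : PySem.Dict Char (Int × Int) :=
  PySem.Dict.ofList [('N', (0, -1)), ('E', (1, 0)), ('S', (0, 1)), ('W', (-1, 0))]

-- one iteration of A's for-loop; state = (x,y), (prev_x,prev_y), positions, distances
-- (Python sets prev_x,prev_y = x,y at the end of every iteration)
def pvStepA (st : (Int × Int) × (Int × Int) × List (Int × Int) × PySem.Dict (Int × Int) Int)
    (c : Char) : (Int × Int) × (Int × Int) × List (Int × Int) × PySem.Dict (Int × Int) Int :=
  let (p, prev, stk, d) := st
  if c = '(' then (p, p, stk ++ [p], d)
  else if c = ')' then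
    match PySem.List.pop? stk (-1) with
    | some (q, stk') => (q, q, stk', d)
    | none => (p, p, stk, d)          -- positions.pop() on []: IndexError, excluded by Pre_
  else if c = '|' then
    match PySem.List.pyGet? stk (-1) with
    | some q => (q, q, stk, d)
    | none => (p, p, stk, d)          -- positions[-1] on []: IndexError, excluded by Pre_
  else
    match pvDirs.get? c with
    | some dxy =>
      let np := (p.1 + dxy.1, p.2 + dxy.2)
      let nd := if d.contains np then min (d.getD np 0) (d.getD prev 0 + 1)
                else d.getD prev 0 + 1
      (np, np, stk, d.insert np nd)   -- distances[prev] always exists (prev is a visited room)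
    | none => (p, p, stk, d)          -- directions[val]: KeyError, excluded by Pre_

def find_far_rooms (values : List String) : Int :=
  let s := (PySem.List.pyGet? values 0).getD ""   -- values[0]; [] raises IndexError, excluded by Pre_
  let regex := (PySem.Str.slice s (some 1) (some (-1))).toList
  let target : Int := if regex.length < 100 then 10 else 1000
  let fin := regex.foldl pvStepA (((0 : Int), (0 : Int)), ((0 : Int), (0 : Int)),
      ([] : List (Int × Int)), (PySem.Dict.empty.insert ((0 : Int), (0 : Int)) (0 : Int)))
  ((fin.2.2.2.values.filter (fun v => decide (v ≥ target))).length : Int)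

-- ===== PORT B =====
-- walk(i, x, y, entry): consumes chars until the ')' closing the current group (or the end).
-- Result: (exited-via-')', remaining chars, current position, distances).
-- fuel ≥ remaining length + 1 at every call, so the 0 branch is never reached on admitted inputs.
def pvWalk (fuel : Nat) (cs : List Char) (p e : Int × Int)
    (d : PySem.Dict (Int × Int) Int) :
    Bool × List Char × (Int × Int) × PySem.Dict (Int × Int) Int :=
  match fuel with
  | 0 => (false, cs, p, d)
  | fuel + 1 =>
    match cs with
    | [] => (false, [], p, d)
    | c :: cs' =>
      if c = '(' then
        let r := pvWalk fuel cs' p p d          -- i = walk(i+1, x, y, (x, y))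
        if r.1 then pvWalk fuel r.2.1 p e r.2.2.2
        else (false, r.2.1, p, r.2.2.2)          -- inner walk hit the end: while loop stops
      else if c = ')' then (true, cs', p, d)     -- return i + 1
      else if c = '|' then pvWalk fuel cs' e e d -- x, y = entry
      else
        match pvDirs.get? c with
        | some dxy =>
          let np := (p.1 + dxy.1, p.2 + dxy.2)
          let nd := d.getD p 0 + 1
          let nv := match d.get? np with | none => nd | some old => min old nd
          pvWalk fuel cs' np e (d.insert np nv)
        | none => (false, cs', p, d)             -- directions[c]: KeyError, excluded by Pre_

def find_far_rooms_alt (values : List String) : Int :=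
  let s := (PySem.List.pyGet? values 0).getD ""
  let cs := (PySem.Str.slice s (some 1) (some (-1))).toList
  let target : Int := if cs.length < 100 then 10 else 1000
  let r := pvWalk (cs.length + 1) cs (0, 0) (0, 0)
      (PySem.Dict.empty.insert ((0 : Int), (0 : Int)) (0 : Int))
  ((r.2.2.2.values.filter (fun v => decide (v ≥ target))).length : Int)

-- ===== PRECONDITION & SPEC =====
-- pvOk cs n: scanning cs with n open groups, every char is one of NESW(|) and
-- every ')' or '|' occurs at positive bracket depth (otherwise A pops/peeks an empty stack).
def pvOk : List Char → Nat → Bool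
  | [], _ => true
  | c :: cs, n =>
    if c = '(' then pvOk cs (n + 1)
    else if c = ')' then decide (0 < n) && pvOk cs (n - 1)
    else if c = '|' then decide (0 < n) && pvOk cs n
    else pvDirs.contains c && pvOk cs n

-- Pre_ = exactly the inputs on which A returns normally: a non-empty list whose first
-- string, stripped of its ^…$ delimiters, is over NESW(|) with no ')' / '|' at depth 0.
def Pre_find_far_rooms (values : List String) : Prop :=
  values ≠ [] ∧
  pvOk ((PySem.Str.slice ((PySem.List.pyGet? values 0).getD "") (some 1) (some (-1))).toList) 0 = true
instance (values : List String) : Decidable (Pre_find_far_rooms values) := by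
  unfold Pre_find_far_rooms; infer_instance

def pvWitness_find_far_rooms : List String := ["^ENWWW(NEEE|SSE(EE|N))$"]

def Spec_find_far_rooms (values : List String) (out : Int) : Prop := out = find_far_rooms_alt values
instance (values : List String) (out : Int) : Decidable (Spec_find_far_rooms values out) := by
  unfold Spec_find_far_rooms; infer_instance

-- ===== CLAIM (what is proved, stated in full; the proofs are below) =====
def Claim_equal_find_far_rooms : Prop := ∀ (values : List String), Dom_find_far_rooms values → Pre_find_far_rooms values → Spec_find_far_rooms values (find_far_rooms values)

-- ===== LEMMAS AND PROOFS =====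

-- A's loop from a state whose prev equals the current position (true at every iteration start).
def pvLoopA (cs : List Char) (p : Int × Int) (stk : List (Int × Int))
    (d : PySem.Dict (Int × Int) Int) :
    (Int × Int) × (Int × Int) × List (Int × Int) × PySem.Dict (Int × Int) Int :=
  cs.foldl pvStepA (p, p, stk, d)

-- A's move step equals B's move step on the same dict.
theorem pvMove_eq (d : PySem.Dict (Int × Int) Int) (p np : Int × Int) :
    (if d.contains np then min (d.getD np 0) (d.getD p 0 + 1) else d.getD p 0 + 1)
      = (match d.get? np with | none => d.getD p 0 + 1 | some old => min old (d.getD p 0 + 1)) := by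
  rw [PySem.Dict.contains_eq_isSome_get?]
  match h : d.get? np with
  | none => simp
  | some old => simp [PySem.Dict.getD_eq_get?_getD, h]

-- Step lemmas for A's loop on states whose prev equals the position.
theorem pvLoopA_open (cs : List Char) (p : Int × Int) (stk : List (Int × Int))
    (d : PySem.Dict (Int × Int) Int) :
    pvLoopA ('(' :: cs) p stk d = pvLoopA cs p (stk ++ [p]) d := by
  simp [pvLoopA, List.foldl, pvStepA]

theorem pvLoopA_close (cs : List Char) (p e : Int × Int) (s : List (Int × Int))
    (d : PySem.Dict (Int × Int) Int) :
    pvLoopA (')' :: cs) p (s ++ [e]) d = pvLoopA cs e s d := by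
  simp [pvLoopA, List.foldl, pvStepA, PySem.List.pop?_last]

theorem pvLoopA_pipe (cs : List Char) (p e : Int × Int) (s : List (Int × Int))
    (d : PySem.Dict (Int × Int) Int) :
    pvLoopA ('|' :: cs) p (s ++ [e]) d = pvLoopA cs e (s ++ [e]) d := by
  simp [pvLoopA, List.foldl, pvStepA, PySem.List.pyGet?_neg_one_append_singleton]

theorem pvLoopA_move (c : Char) (dxy : Int × Int) (hg : pvDirs.get? c = some dxy)
    (h1 : ¬ c = '(') (h2 : ¬ c = ')') (h3 : ¬ c = '|')
    (cs : List Char) (p : Int × Int) (stk : List (Int × Int))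
    (d : PySem.Dict (Int × Int) Int) :
    pvLoopA (c :: cs) p stk d
      = pvLoopA cs (p.1 + dxy.1, p.2 + dxy.2) stk
          (d.insert (p.1 + dxy.1, p.2 + dxy.2)
            (match d.get? (p.1 + dxy.1, p.2 + dxy.2) with
             | none => d.getD p 0 + 1
             | some old => min old (d.getD p 0 + 1))) := by
  have hm := pvMove_eq d p (p.1 + dxy.1, p.2 + dxy.2)
  simp only [pvLoopA, List.foldl]
  congr 1
  simp [pvStepA, h1, h2, h3, hg, hm]

theorem pvContains_get? (c : Char) (h : pvDirs.contains c = true) :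
    ∃ dxy, pvDirs.get? c = some dxy := by
  rw [PySem.Dict.contains_eq_isSome_get?] at h
  cases hg : pvDirs.get? c
  · rw [hg] at h; simp at h
  · exact ⟨_, rfl⟩

-- Main correspondence inside one group: A's loop with stack s ++ [e] and B's walker with entry e.
theorem pvW (fuel : Nat) : ∀ (cs : List Char) (p e : Int × Int) (s : List (Int × Int))
    (d : PySem.Dict (Int × Int) Int) (n : Nat), cs.length ≤ fuel → pvOk cs (n + 1) = true →
    ((pvWalk fuel cs p e d).1 = true →
      pvOk (pvWalk fuel cs p e d).2.1 n = true ∧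
      (pvWalk fuel cs p e d).2.1.length < cs.length ∧
      pvLoopA cs p (s ++ [e]) d
        = pvLoopA (pvWalk fuel cs p e d).2.1 e s (pvWalk fuel cs p e d).2.2.2) ∧
    ((pvWalk fuel cs p e d).1 = false →
      (pvWalk fuel cs p e d).2.1 = [] ∧
      (pvLoopA cs p (s ++ [e]) d).2.2.2 = (pvWalk fuel cs p e d).2.2.2) := by
  induction fuel with
  | zero =>
    intro cs p e s d n hf hok
    have hcs : cs = [] := List.eq_nil_of_length_eq_zero (Nat.le_zero.mp hf)
    subst hcs
    exact ⟨by intro h; simp [pvWalk] at h, by intro _; exact ⟨rfl, rfl⟩⟩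
  | succ fuel ih =>
    intro cs p e s d n hf hok
    match cs with
    | [] => exact ⟨by intro h; simp [pvWalk] at h, by intro _; exact ⟨rfl, rfl⟩⟩
    | c :: cs' =>
      simp only [List.length_cons] at hf
      have hf' : cs'.length ≤ fuel := by omega
      by_cases h1 : c = '('
      · subst h1
        have hok' : pvOk cs' (n + 1 + 1) = true := by simpa [pvOk] using hok
        have IH1 := ih cs' p p (s ++ [e]) d (n + 1) hf' hok'
        have hw : pvWalk (fuel + 1) ('(' :: cs') p e d =
            (if (pvWalk fuel cs' p p d).1 then
              pvWalk fuel (pvWalk fuel cs' p p d).2.1 p e (pvWalk fuel cs' p p d).2.2.2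
             else (false, (pvWalk fuel cs' p p d).2.1, p, (pvWalk fuel cs' p p d).2.2.2)) := by
          simp [pvWalk]
        rw [hw]
        by_cases hx : (pvWalk fuel cs' p p d).1 = true
        · obtain ⟨hok1, hlt1, heq1⟩ := IH1.1 hx
          rw [if_pos hx]
          have hf2 : (pvWalk fuel cs' p p d).2.1.length ≤ fuel := by omega
          have IH2 := ih (pvWalk fuel cs' p p d).2.1 p e s (pvWalk fuel cs' p p d).2.2.2 n hf2 hok1
          have hstep : pvLoopA ('(' :: cs') p (s ++ [e]) d
              = pvLoopA (pvWalk fuel cs' p p d).2.1 p (s ++ [e]) (pvWalk fuel cs' p p d).2.2.2 := by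
            rw [pvLoopA_open]; exact heq1
          constructor
          · intro hx2
            obtain ⟨ha, hb, hc⟩ := IH2.1 hx2
            exact ⟨ha, by simp only [List.length_cons]; omega, by rw [hstep, hc]⟩
          · intro hx2
            obtain ⟨ha, hb⟩ := IH2.2 hx2
            exact ⟨ha, by rw [hstep]; exact hb⟩
        · have hx' : (pvWalk fuel cs' p p d).1 = false := by
            revert hx; cases (pvWalk fuel cs' p p d).1 <;> simp
          rw [if_neg (by simp [hx'])]
          obtain ⟨ha, hb⟩ := IH1.2 hx'
          exact ⟨by intro h; simp at h, by intro _; exact ⟨ha, by rw [pvLoopA_open]; exact hb⟩⟩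
      · by_cases h2 : c = ')'
        · subst h2
          have hok' : pvOk cs' n = true := by simpa [pvOk] using hok
          have hw : pvWalk (fuel + 1) (')' :: cs') p e d = (true, cs', p, d) := by
            simp [pvWalk]
          rw [hw]
          exact ⟨by intro _; exact ⟨hok', by simp, by rw [pvLoopA_close]⟩,
                 by intro h; simp at h⟩
        · by_cases h3 : c = '|'
          · subst h3
            have hok' : pvOk cs' (n + 1) = true := by simpa [pvOk] using hok
            have hw : pvWalk (fuel + 1) ('|' :: cs') p e d = pvWalk fuel cs' e e d := by
              simp [pvWalk]
            rw [hw]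
            have IH1 := ih cs' e e s d n hf' hok'
            constructor
            · intro hx
              obtain ⟨ha, hb, hc⟩ := IH1.1 hx
              exact ⟨ha, by simp only [List.length_cons]; omega, by rw [pvLoopA_pipe]; exact hc⟩
            · intro hx
              obtain ⟨ha, hb⟩ := IH1.2 hx
              exact ⟨ha, by rw [pvLoopA_pipe]; exact hb⟩
          · have hok2 : pvDirs.contains c = true ∧ pvOk cs' (n + 1) = true := by
              simpa [pvOk, h1, h2, h3] using hok
            obtain ⟨dxy, hg⟩ := pvContains_get? c hok2.1
            have hok' := hok2.2
            have hw : pvWalk (fuel + 1) (c :: cs') p e d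
                = pvWalk fuel cs' (p.1 + dxy.1, p.2 + dxy.2) e
                    (d.insert (p.1 + dxy.1, p.2 + dxy.2)
                      (match d.get? (p.1 + dxy.1, p.2 + dxy.2) with
                       | none => d.getD p 0 + 1
                       | some old => min old (d.getD p 0 + 1))) := by
              simp [pvWalk, h1, h2, h3, hg]
            rw [hw]
            have IH1 := ih cs' (p.1 + dxy.1, p.2 + dxy.2) e s
                (d.insert (p.1 + dxy.1, p.2 + dxy.2)
                  (match d.get? (p.1 + dxy.1, p.2 + dxy.2) with
                   | none => d.getD p 0 + 1
                   | some old => min old (d.getD p 0 + 1))) n hf' hok'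
            have hstep := pvLoopA_move c dxy hg h1 h2 h3 cs' p (s ++ [e]) d
            constructor
            · intro hx
              obtain ⟨ha, hb, hc⟩ := IH1.1 hx
              exact ⟨ha, by simp only [List.length_cons]; omega, by rw [hstep]; exact hc⟩
            · intro hx
              obtain ⟨ha, hb⟩ := IH1.2 hx
              exact ⟨ha, by rw [hstep]; exact hb⟩

-- Top level: with no ')' or '|' at depth 0, A's loop and B's walker build the same dict.
theorem pvT (fuel : Nat) : ∀ (cs : List Char) (p : Int × Int)
    (d : PySem.Dict (Int × Int) Int), cs.length ≤ fuel → pvOk cs 0 = true →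
    (pvLoopA cs p [] d).2.2.2 = (pvWalk fuel cs p (0, 0) d).2.2.2 := by
  induction fuel with
  | zero =>
    intro cs p d hf hok
    have hcs : cs = [] := List.eq_nil_of_length_eq_zero (Nat.le_zero.mp hf)
    subst hcs; rfl
  | succ fuel ih =>
    intro cs p d hf hok
    match cs with
    | [] => rfl
    | c :: cs' =>
      simp only [List.length_cons] at hf
      have hf' : cs'.length ≤ fuel := by omega
      by_cases h1 : c = '('
      · subst h1
        have hok' : pvOk cs' (0 + 1) = true := by simpa [pvOk] using hok
        have W := pvW fuel cs' p p [] d 0 hf' hok'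
        have hw : pvWalk (fuel + 1) ('(' :: cs') p (0, 0) d =
            (if (pvWalk fuel cs' p p d).1 then
              pvWalk fuel (pvWalk fuel cs' p p d).2.1 p (0, 0) (pvWalk fuel cs' p p d).2.2.2
             else (false, (pvWalk fuel cs' p p d).2.1, p, (pvWalk fuel cs' p p d).2.2.2)) := by
          simp [pvWalk]
        rw [hw]
        by_cases hx : (pvWalk fuel cs' p p d).1 = true
        · obtain ⟨hok1, hlt1, heq1⟩ := W.1 hx
          rw [if_pos hx, pvLoopA_open, heq1]
          exact ih (pvWalk fuel cs' p p d).2.1 p (pvWalk fuel cs' p p d).2.2.2 (by omega) hok1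
        · have hx' : (pvWalk fuel cs' p p d).1 = false := by
            revert hx; cases (pvWalk fuel cs' p p d).1 <;> simp
          rw [if_neg (by simp [hx'])]
          obtain ⟨ha, hb⟩ := W.2 hx'
          rw [pvLoopA_open]; exact hb
      · by_cases h2 : c = ')'
        · subst h2; simp [pvOk] at hok
        · by_cases h3 : c = '|'
          · subst h3; simp [pvOk, h2] at hok
          · have hok2 : pvDirs.contains c = true ∧ pvOk cs' 0 = true := by
              simpa [pvOk, h1, h2, h3] using hok
            obtain ⟨dxy, hg⟩ := pvContains_get? c hok2.1
            have hw : pvWalk (fuel + 1) (c :: cs') p (0, 0) d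
                = pvWalk fuel cs' (p.1 + dxy.1, p.2 + dxy.2) (0, 0)
                    (d.insert (p.1 + dxy.1, p.2 + dxy.2)
                      (match d.get? (p.1 + dxy.1, p.2 + dxy.2) with
                       | none => d.getD p 0 + 1
                       | some old => min old (d.getD p 0 + 1))) := by
              simp [pvWalk, h1, h2, h3, hg]
            rw [hw, pvLoopA_move c dxy hg h1 h2 h3 cs' p [] d]
            exact ih cs' (p.1 + dxy.1, p.2 + dxy.2) _ hf' hok2.2

-- ===== VERDICT (by name: the statement is the Claim_ definition above) =====
theorem find_far_rooms_spec : Claim_equal_find_far_rooms := by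
  intro values _ hpre
  obtain ⟨hne, hok⟩ := hpre
  show find_far_rooms values = find_far_rooms_alt values
  unfold find_far_rooms find_far_rooms_alt
  simp only []
  rw [show ∀ cs p stk d0, cs.foldl pvStepA (p, p, stk, d0) = pvLoopA cs p stk d0
      from fun _ _ _ _ => rfl]
  rw [pvT ((PySem.Str.slice ((PySem.List.pyGet? values 0).getD "") (some 1) (some (-1))).toList.length + 1)
      _ _ _ (by omega) hok]
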